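-- pv_equiv track=rewrite | github.com/nablarch/nabledge-dev | tools/rbkc/scripts/create/converters/xlsx_common.py | _run_length
-- ===== SOURCE A (Python) =====
-- def _run_length(row: list[str]) -> int:
--     """Longest run of contiguous non-empty cells in *row*."""
--     best = cur = 0
--     for v in row:
--         if v:
--             cur += 1
--             best = max(best, cur)
--         else:
--             cur = 0
--     return best
-- ===== SOURCE B (Python) =====
-- from itertools import groupby
--
--
-- def _run_length(row: list[str]) -> int:
--     """Longest run of contiguous non-empty cells in *row*."""
--     return max((sum(1 for _ in g) for k, g in groupby(row, key=bool) if k),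
--                default=0)
-- ===== Notes on version B (the rewrite author's own statement) =====
-- stated objective: idiomatic
-- what changed: Replaces A's running-counter-with-max state machine by an itertools.groupby pipeline: partition the row into maximal runs of equal truthiness and take the max length over the truthy runs (default 0); the grouping and counting run in C, giving a constant-factor speedup.
import Mathlib
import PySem

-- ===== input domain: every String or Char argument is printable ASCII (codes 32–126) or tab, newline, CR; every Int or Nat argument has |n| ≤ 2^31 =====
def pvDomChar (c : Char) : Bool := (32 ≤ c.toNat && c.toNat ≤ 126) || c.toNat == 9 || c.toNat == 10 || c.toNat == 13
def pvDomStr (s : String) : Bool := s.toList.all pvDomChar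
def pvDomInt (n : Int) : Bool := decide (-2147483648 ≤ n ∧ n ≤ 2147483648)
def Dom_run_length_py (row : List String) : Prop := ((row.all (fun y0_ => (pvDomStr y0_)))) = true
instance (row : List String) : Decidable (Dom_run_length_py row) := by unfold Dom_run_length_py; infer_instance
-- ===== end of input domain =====

-- B replaces A's running-counter-with-max scan by a groupby-style pipeline (split into maximal truthy runs, take the max length, default 0); same O(n) cost, more idiomatic.
-- ===== PORT A =====
def run_length_py (row : List String) : Int :=
  (row.foldl (fun (st : Int × Int) v =>
      if v ≠ "" then (max st.1 (st.2 + 1), st.2 + 1) else (st.1, 0)) (0, 0)).1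

-- ===== PORT B =====
-- groupby(row, key=bool): peel maximal runs; keep the lengths of the truthy runs
def pvRuns : List String → List Nat
  | [] => []
  | v :: t =>
    if v ≠ "" then
      (1 + (t.takeWhile (fun s => s ≠ "")).length) :: pvRuns (t.dropWhile (fun s => s ≠ ""))
    else
      pvRuns t
termination_by l => l.length
decreasing_by
  · exact Nat.lt_succ_of_le (List.length_dropWhile_le _ _)
  · exact Nat.lt_succ_self _

-- max(lengths of truthy runs, default=0)
def run_length_py_alt (row : List String) : Int :=
  (pvRuns row).foldl (fun acc n => max acc (Int.ofNat n)) 0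

-- ===== PRECONDITION & SPEC =====
def Spec_run_length_py (row : List String) (out : Int) : Prop := out = run_length_py_alt row
instance (row : List String) (out : Int) : Decidable (Spec_run_length_py row out) := by unfold Spec_run_length_py; infer_instance

-- ===== CLAIM (what is proved, stated in full; the proofs are below) =====
def Claim_equal_run_length_py : Prop := ∀ (row : List String), Dom_run_length_py row → Spec_run_length_py row (run_length_py row)

-- ===== LEMMAS AND PROOFS =====

-- helper: A's loop, as explicit recursion over (best, cur)
def pvF (cur : Int) : List String → Int
  | [] => 0
  | v :: t => if v ≠ "" then max (cur + 1) (pvF (cur + 1) t) else pvF 0 t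

theorem pvFoldlMaxInit (l : List Nat) : ∀ a : Int, 0 ≤ a →
    l.foldl (fun acc n => max acc (Int.ofNat n)) a
      = max a (l.foldl (fun acc n => max acc (Int.ofNat n)) 0) := by
  induction l with
  | nil => intro a ha; simp only [List.foldl_nil]; omega
  | cons b t ih =>
    intro a ha
    simp only [List.foldl_cons]
    rw [ih (max a (Int.ofNat b)) (le_trans ha (le_max_left _ _)), ih (max 0 (Int.ofNat b)) (le_max_left _ _)]
    omega

theorem pvAltNonneg (row : List String) : 0 ≤ run_length_py_alt row := by
  unfold run_length_py_alt
  rw [pvFoldlMaxInit _ 0 le_rfl]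
  omega

-- alt peels one maximal truthy run off the front
theorem pvAltPeel (row : List String) :
    run_length_py_alt row =
      max (if (row.takeWhile (fun s => s ≠ "")) ≠ [] then
             ((row.takeWhile (fun s => s ≠ "")).length : Int) else 0)
          (run_length_py_alt (row.dropWhile (fun s => s ≠ ""))) := by
  cases row with
  | nil => simp [run_length_py_alt, pvRuns]
  | cons v t =>
    by_cases hv : v ≠ ""
    · simp only [List.takeWhile_cons, List.dropWhile_cons, decide_eq_true hv, if_pos]
      simp only [run_length_py_alt, pvRuns, if_pos hv, List.foldl_cons]
      rw [pvFoldlMaxInit _ (max 0 _) (le_max_left _ _)]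
      simp only [List.length_cons, ne_eq, reduceCtorEq, not_false_eq_true, if_true]
      push_cast [Int.ofNat_eq_natCast]
      omega
    · simp only [ne_eq, not_not] at hv
      subst hv
      simp only [List.takeWhile_cons, List.dropWhile_cons]
      norm_num
      have h := pvAltNonneg (("" : String) :: t)
      omega

theorem pvFEqAlt : ∀ (row : List String) (cur : Int), 0 ≤ cur →
    pvF cur row =
      max (if (row.takeWhile (fun s => s ≠ "")) ≠ [] then
             cur + ((row.takeWhile (fun s => s ≠ "")).length : Int) else 0)
          (run_length_py_alt (row.dropWhile (fun s => s ≠ ""))) := by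
  intro row
  induction row with
  | nil =>
    intro cur _
    simp [pvF, run_length_py_alt, pvRuns]
  | cons v t ih =>
    intro cur hcur
    by_cases hv : v ≠ ""
    · simp only [pvF, if_pos hv, List.takeWhile_cons, List.dropWhile_cons,
        decide_eq_true hv, if_pos]
      rw [ih (cur + 1) (by omega)]
      by_cases ht : (t.takeWhile (fun s => s ≠ "")) ≠ []
      · simp only [ht, if_pos, List.length_cons, ne_eq, reduceCtorEq,
          not_false_eq_true]
        push_cast [Int.ofNat_eq_natCast]
        omega
      · simp only [ne_eq, not_not] at ht
        have := pvAltNonneg (t.dropWhile (fun s => s ≠ ""))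
        simp only [ne_eq, reduceCtorEq, not_false_eq_true, if_true,
          List.length_cons, ht, List.length_nil]
        push_cast [Int.ofNat_eq_natCast]
        omega
    · simp only [ne_eq, not_not] at hv
      subst hv
      simp only [pvF, List.takeWhile_cons, List.dropWhile_cons]
      norm_num
      rw [ih 0 le_rfl]
      simp only [zero_add]
      rw [← pvAltPeel t]
      have h1 := pvAltNonneg t
      have h2 : run_length_py_alt (("" : String) :: t) = run_length_py_alt t := by
        simp [run_length_py_alt, pvRuns]
      omega

theorem pvLoopEq : ∀ (row : List String) (best cur : Int), 0 ≤ best →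
    (row.foldl (fun (st : Int × Int) v =>
        if v ≠ "" then (max st.1 (st.2 + 1), st.2 + 1) else (st.1, 0)) (best, cur)).1
      = max best (pvF cur row) := by
  intro row
  induction row with
  | nil => intro best cur hb; simp [pvF]; omega
  | cons v t ih =>
    intro best cur hb
    by_cases hv : v ≠ ""
    · simp only [List.foldl_cons, if_pos hv, pvF]
      rw [ih (max best (cur + 1)) (cur + 1) (by omega)]
      omega
    · simp only [List.foldl_cons, if_neg hv, pvF]
      rw [ih best 0 hb]

-- ===== VERDICT (by name: the statement is the Claim_ definition above) =====
theorem run_length_py_spec : Claim_equal_run_length_py := by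
  intro row _
  unfold Spec_run_length_py run_length_py
  rw [pvLoopEq row 0 0 le_rfl, pvFEqAlt row 0 le_rfl]
  simp only [zero_add]
  rw [← pvAltPeel row]
  have := pvAltNonneg row
  omega
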